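-- pv_equiv track=rewrite | github.com/kira-1011/A2SV | progress_sheet/africanCrossword.py | crossout
-- ===== SOURCE A (Python) =====
-- def crossout(grid, row, col):
--
--     directions = [(0, 1), (0, -1), (1, 0), (-1, 0)]
--     checkBound = lambda r, c: -1 < r < len(grid) and -1 < c < len(grid[0])
--     target = grid[row][col]
--     curr_row = row
--     curr_col = col
--
--     for direction in directions:
--
--         while checkBound(curr_row, curr_col):
--
--             if (curr_row != row or curr_col != col) and grid[curr_row][curr_col] == target:
--                 return True
--
--             curr_row += direction[0]
--             curr_col += direction[1]
--
--         curr_row = row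
--         curr_col = col
--
--     return False
-- ===== SOURCE B (Python) =====
-- def crossout(grid, row, col):
--     target = grid[row][col]
--     n, m = len(grid), len(grid[0])
--     if not (0 <= row < n and 0 <= col < m):
--         return False
--     for c in range(m):
--         if c != col and grid[row][c] == target:
--             return True
--     for r in range(n):
--         if r != row and grid[r][col] == target:
--             return True
--     return False
-- ===== Notes on version B (the rewrite author's own statement) =====
-- stated objective: simpler
-- what changed: Replaces A's four direction-vector walks driven by a bounds-checking lambda with one explicit rectangle check followed by two straight index passes, one across the row and one down the column.
-- outside the precondition, e.g. on crossout([['x', 'y'], ['q'], ['p', 'c'], ['a', 'c']], 2, 1): A returns True, B raises IndexError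
import Mathlib
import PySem

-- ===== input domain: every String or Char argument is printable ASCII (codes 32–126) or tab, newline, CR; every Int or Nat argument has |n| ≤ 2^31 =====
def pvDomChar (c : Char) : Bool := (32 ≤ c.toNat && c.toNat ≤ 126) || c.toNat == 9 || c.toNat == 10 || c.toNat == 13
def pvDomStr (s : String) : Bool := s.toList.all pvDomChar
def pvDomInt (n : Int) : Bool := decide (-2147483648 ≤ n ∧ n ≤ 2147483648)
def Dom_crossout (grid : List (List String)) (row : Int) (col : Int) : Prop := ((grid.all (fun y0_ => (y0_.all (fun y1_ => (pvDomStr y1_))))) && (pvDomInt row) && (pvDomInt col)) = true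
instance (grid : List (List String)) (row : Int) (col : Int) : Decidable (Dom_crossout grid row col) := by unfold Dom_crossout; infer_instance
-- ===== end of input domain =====

-- B replaces A's four direction-vector walks (with a bounds-checking lambda) by one explicit
-- rectangle check followed by two plain index passes (across the row, down the column): simpler, same cost.


-- ===== PORT A =====
-- grid[r][c] (inside Pre_ the indices are always in range, so the .getD defaults are never used)
def cellA (grid : List (List String)) (r c : Int) : String :=
  (PySem.List.pyGet? ((PySem.List.pyGet? grid r).getD []) c).getD ""

-- the 'while checkBound(...)' walk of A along one direction (dr, dc); fuel makes it total,
-- and is chosen large enough that the bound check, not the fuel, always terminates the walk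
def crossoutWalk (grid : List (List String)) (row col : Int) (target : String)
    (dr dc : Int) (r c : Int) : Nat → Bool
  | 0 => false
  | fuel + 1 =>
    if (-1 : Int) < r ∧ r < (grid.length : Int) ∧ (-1 : Int) < c ∧ c < (((grid.headD []).length : Int)) then
      if (decide (r ≠ row) || decide (c ≠ col)) && (cellA grid r c == target) then true
      else crossoutWalk grid row col target dr dc (r + dr) (c + dc) fuel
    else false

def crossout (grid : List (List String)) (row : Int) (col : Int) : Bool :=
  let directions : List (Int × Int) := [(0, 1), (0, -1), (1, 0), (-1, 0)]
  let target := cellA grid row col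
  let fuel := grid.length + (grid.headD []).length + 2
  directions.any (fun d => crossoutWalk grid row col target d.1 d.2 row col fuel)

-- ===== PORT B =====
def cellB (grid : List (List String)) (r c : Int) : String :=
  (PySem.List.pyGet? ((PySem.List.pyGet? grid r).getD []) c).getD ""

def crossout_alt (grid : List (List String)) (row : Int) (col : Int) : Bool :=
  let target := cellB grid row col
  let n := grid.length
  let m := (grid.headD []).length   -- len(grid[0]); Python raises on an empty grid (outside Pre_)
  if 0 ≤ row ∧ row < (n : Int) ∧ 0 ≤ col ∧ col < (m : Int) then
    ((List.range m).any
        (fun c => decide ((c : Int) ≠ col) && (cellB grid row (c : Int) == target))) ||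
    ((List.range n).any
        (fun r => decide ((r : Int) ≠ row) && (cellB grid (r : Int) col == target)))
  else false

-- ===== PRECONDITION & SPEC =====
-- Pre_ excludes exactly the inputs where either program raises an IndexError: out-of-range
-- (row, col) (A raises computing grid[row][col]), and — only when (row, col) lies inside the
-- scanned rectangle — ragged grids whose short rows a scan may hit; on such ragged grids whether
-- a raise or a value comes first depends on the cell values and the scan order (see claim cites).
def Pre_crossout (grid : List (List String)) (row : Int) (col : Int) : Prop :=
  grid ≠ [] ∧ -(grid.length : Int) ≤ row ∧ row < (grid.length : Int) ∧
    -((((PySem.List.pyGet? grid row).getD []).length : Int)) ≤ col ∧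
    col < ((((PySem.List.pyGet? grid row).getD []).length : Int)) ∧
    (0 ≤ row → 0 ≤ col → col < (((grid.headD []).length : Int)) →
      ((grid.headD []).length ≤ ((PySem.List.pyGet? grid row).getD []).length ∧
        ∀ l ∈ grid, col < (l.length : Int)))
instance (grid : List (List String)) (row : Int) (col : Int) : Decidable (Pre_crossout grid row col) := by
  unfold Pre_crossout; infer_instance

def pvWitness_crossout : List (List String) × Int × Int := ([["a", "b"], ["c", "a"]], 0, 0)

def Spec_crossout (grid : List (List String)) (row : Int) (col : Int) (out : Bool) : Prop := out = crossout_alt grid row col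
instance (grid : List (List String)) (row : Int) (col : Int) (out : Bool) : Decidable (Spec_crossout grid row col out) := by unfold Spec_crossout; infer_instance

-- ===== CLAIM (what is proved, stated in full; the proofs are below) =====
def Claim_equal_crossout : Prop := ∀ (grid : List (List String)) (row : Int) (col : Int), Dom_crossout grid row col → Pre_crossout grid row col → Spec_crossout grid row col (crossout grid row col)

-- ===== LEMMAS AND PROOFS =====

theorem cellB_eq_cellA : cellB = cellA := rfl

-- walk to the right: finds exactly a matching cell at some d with col ≤ d < m (d ≠ col)
theorem walkR_iff (grid : List (List String)) (row col : Int) (target : String)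
    (hr0 : (-1 : Int) < row) (hr1 : row < (grid.length : Int)) :
    ∀ (fuel : Nat) (c : Int), 0 ≤ c → (((grid.headD []).length : Int)) ≤ c + fuel →
      (crossoutWalk grid row col target 0 1 row c fuel = true ↔
        ∃ d : Int, c ≤ d ∧ d < (((grid.headD []).length : Int)) ∧ d ≠ col ∧ cellA grid row d = target) := by
  intro fuel
  induction fuel with
  | zero =>
    intro c hc hf
    simp only [crossoutWalk]
    constructor
    · intro h; exact absurd h (by simp)
    · rintro ⟨d, h1, h2, -⟩; omega
  | succ fuel ih =>
    intro c hc hf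
    rw [crossoutWalk]
    by_cases hb : ((-1 : Int) < row ∧ row < (grid.length : Int) ∧ (-1 : Int) < c ∧ c < (((grid.headD []).length : Int)))
    · rw [if_pos hb]
      by_cases hcond : ((decide (row ≠ row) || decide (c ≠ col)) && (cellA grid row c == target)) = true
      · rw [if_pos hcond]
        simp only [Bool.or_eq_true, Bool.and_eq_true, decide_eq_true_iff, beq_iff_eq] at hcond
        constructor
        · intro _
          refine ⟨c, le_refl c, hb.2.2.2, ?_, hcond.2⟩
          rcases hcond.1 with h | h
          · exact absurd rfl h
          · exact h
        · intro _; rfl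
      · rw [if_neg hcond]
        simp only [Bool.and_eq_true, Bool.or_eq_true, decide_eq_true_iff, beq_iff_eq, not_and] at hcond
        simp only [add_zero]
        rw [ih (c + 1) (by omega) (by push_cast at hf ⊢; omega)]
        constructor
        · rintro ⟨d, h1, h2, h3, h4⟩; exact ⟨d, by omega, h2, h3, h4⟩
        · rintro ⟨d, h1, h2, h3, h4⟩
          refine ⟨d, ?_, h2, h3, h4⟩
          rcases eq_or_lt_of_le h1 with rfl | hlt
          · exfalso
            have := hcond (Or.inr (by exact fun hh => h3 hh))
            exact this h4
          · omega
    · rw [if_neg hb]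
      have hcm : (((grid.headD []).length : Int)) ≤ c := by
        push Not at hb
        have := hb hr0 hr1 (by omega)
        omega
      constructor
      · intro h; exact absurd h (by simp)
      · rintro ⟨d, h1, h2, -⟩; omega

-- walk to the left: finds exactly a matching cell at some d with 0 ≤ d ≤ c (d ≠ col)
theorem walkL_iff (grid : List (List String)) (row col : Int) (target : String)
    (hr0 : (-1 : Int) < row) (hr1 : row < (grid.length : Int)) :
    ∀ (fuel : Nat) (c : Int), c < (((grid.headD []).length : Int)) → c < fuel →
      (crossoutWalk grid row col target 0 (-1) row c fuel = true ↔
        ∃ d : Int, 0 ≤ d ∧ d ≤ c ∧ d ≠ col ∧ cellA grid row d = target) := by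
  intro fuel
  induction fuel with
  | zero =>
    intro c hcm hf
    simp only [crossoutWalk]
    constructor
    · intro h; exact absurd h (by simp)
    · rintro ⟨d, h1, h2, -⟩; omega
  | succ fuel ih =>
    intro c hcm hf
    rw [crossoutWalk]
    by_cases hb : ((-1 : Int) < row ∧ row < (grid.length : Int) ∧ (-1 : Int) < c ∧ c < (((grid.headD []).length : Int)))
    · rw [if_pos hb]
      by_cases hcond : ((decide (row ≠ row) || decide (c ≠ col)) && (cellA grid row c == target)) = true
      · rw [if_pos hcond]
        simp only [Bool.or_eq_true, Bool.and_eq_true, decide_eq_true_iff, beq_iff_eq] at hcond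
        constructor
        · intro _
          refine ⟨c, by omega, le_refl c, ?_, hcond.2⟩
          rcases hcond.1 with h | h
          · exact absurd rfl h
          · exact h
        · intro _; rfl
      · rw [if_neg hcond]
        simp only [Bool.and_eq_true, Bool.or_eq_true, decide_eq_true_iff, beq_iff_eq, not_and] at hcond
        simp only [add_zero]
        rw [ih (c + -1) (by omega) (by push_cast at hf ⊢; omega)]
        constructor
        · rintro ⟨d, h1, h2, h3, h4⟩; exact ⟨d, h1, by omega, h3, h4⟩
        · rintro ⟨d, h1, h2, h3, h4⟩
          refine ⟨d, h1, ?_, h3, h4⟩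
          rcases eq_or_lt_of_le h2 with rfl | hlt
          · exfalso
            have := hcond (Or.inr (by exact fun hh => h3 hh))
            exact this h4
          · omega
    · rw [if_neg hb]
      have hc0 : c < 0 := by
        push Not at hb
        have := hb hr0 hr1
        omega
      constructor
      · intro h; exact absurd h (by simp)
      · rintro ⟨d, h1, h2, -⟩; omega

-- walk down
theorem walkD_iff (grid : List (List String)) (row col : Int) (target : String)
    (hc0 : (-1 : Int) < col) (hc1 : col < (((grid.headD []).length : Int))) :
    ∀ (fuel : Nat) (r : Int), 0 ≤ r → (grid.length : Int) ≤ r + fuel →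
      (crossoutWalk grid row col target 1 0 r col fuel = true ↔
        ∃ d : Int, r ≤ d ∧ d < (grid.length : Int) ∧ d ≠ row ∧ cellA grid d col = target) := by
  intro fuel
  induction fuel with
  | zero =>
    intro r hr hf
    simp only [crossoutWalk]
    constructor
    · intro h; exact absurd h (by simp)
    · rintro ⟨d, h1, h2, -⟩; omega
  | succ fuel ih =>
    intro r hr hf
    rw [crossoutWalk]
    by_cases hb : ((-1 : Int) < r ∧ r < (grid.length : Int) ∧ (-1 : Int) < col ∧ col < (((grid.headD []).length : Int)))
    · rw [if_pos hb]
      by_cases hcond : ((decide (r ≠ row) || decide (col ≠ col)) && (cellA grid r col == target)) = true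
      · rw [if_pos hcond]
        simp only [Bool.or_eq_true, Bool.and_eq_true, decide_eq_true_iff, beq_iff_eq] at hcond
        constructor
        · intro _
          refine ⟨r, le_refl r, hb.2.1, ?_, hcond.2⟩
          rcases hcond.1 with h | h
          · exact h
          · exact absurd rfl h
        · intro _; rfl
      · rw [if_neg hcond]
        simp only [Bool.and_eq_true, Bool.or_eq_true, decide_eq_true_iff, beq_iff_eq, not_and] at hcond
        simp only [add_zero]
        rw [ih (r + 1) (by omega) (by push_cast at hf ⊢; omega)]
        constructor
        · rintro ⟨d, h1, h2, h3, h4⟩; exact ⟨d, by omega, h2, h3, h4⟩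
        · rintro ⟨d, h1, h2, h3, h4⟩
          refine ⟨d, ?_, h2, h3, h4⟩
          rcases eq_or_lt_of_le h1 with rfl | hlt
          · exfalso
            have := hcond (Or.inl (by exact fun hh => h3 hh))
            exact this h4
          · omega
    · rw [if_neg hb]
      have hrn : (grid.length : Int) ≤ r := by
        push Not at hb
        have := hb (by omega)
        omega
      constructor
      · intro h; exact absurd h (by simp)
      · rintro ⟨d, h1, h2, -⟩; omega

-- walk up
theorem walkU_iff (grid : List (List String)) (row col : Int) (target : String)
    (hc0 : (-1 : Int) < col) (hc1 : col < (((grid.headD []).length : Int))) :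
    ∀ (fuel : Nat) (r : Int), r < (grid.length : Int) → r < fuel →
      (crossoutWalk grid row col target (-1) 0 r col fuel = true ↔
        ∃ d : Int, 0 ≤ d ∧ d ≤ r ∧ d ≠ row ∧ cellA grid d col = target) := by
  intro fuel
  induction fuel with
  | zero =>
    intro r hrn hf
    simp only [crossoutWalk]
    constructor
    · intro h; exact absurd h (by simp)
    · rintro ⟨d, h1, h2, -⟩; omega
  | succ fuel ih =>
    intro r hrn hf
    rw [crossoutWalk]
    by_cases hb : ((-1 : Int) < r ∧ r < (grid.length : Int) ∧ (-1 : Int) < col ∧ col < (((grid.headD []).length : Int)))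
    · rw [if_pos hb]
      by_cases hcond : ((decide (r ≠ row) || decide (col ≠ col)) && (cellA grid r col == target)) = true
      · rw [if_pos hcond]
        simp only [Bool.or_eq_true, Bool.and_eq_true, decide_eq_true_iff, beq_iff_eq] at hcond
        constructor
        · intro _
          refine ⟨r, by omega, le_refl r, ?_, hcond.2⟩
          rcases hcond.1 with h | h
          · exact h
          · exact absurd rfl h
        · intro _; rfl
      · rw [if_neg hcond]
        simp only [Bool.and_eq_true, Bool.or_eq_true, decide_eq_true_iff, beq_iff_eq, not_and] at hcond
        simp only [add_zero]
        rw [ih (r + -1) (by omega) (by push_cast at hf ⊢; omega)]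
        constructor
        · rintro ⟨d, h1, h2, h3, h4⟩; exact ⟨d, h1, by omega, h3, h4⟩
        · rintro ⟨d, h1, h2, h3, h4⟩
          refine ⟨d, h1, ?_, h3, h4⟩
          rcases eq_or_lt_of_le h2 with rfl | hlt
          · exfalso
            have := hcond (Or.inl (by exact fun hh => h3 hh))
            exact this h4
          · omega
    · rw [if_neg hb]
      have hr0 : r < 0 := by
        push Not at hb
        omega
      constructor
      · intro h; exact absurd h (by simp)
      · rintro ⟨d, h1, h2, -⟩; omega

-- a walk started outside the bound check returns false at once, whatever the fuel
theorem walk_out (grid : List (List String)) (row col : Int) (target : String) (d1 d2 : Int)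
    (h : ¬((-1 : Int) < row ∧ row < (grid.length : Int) ∧ (-1 : Int) < col ∧ col < (((grid.headD []).length : Int)))) :
    ∀ fuel : Nat, crossoutWalk grid row col target d1 d2 row col fuel = false := by
  intro fuel
  cases fuel with
  | zero => rfl
  | succ f => rw [crossoutWalk, if_neg h]

-- ===== VERDICT (by name: the statement is the Claim_ definition above) =====
theorem crossout_spec : Claim_equal_crossout := by
  intro grid row col _hdom hpre
  obtain ⟨hne, h1, h2, h3, h4, hscan⟩ := hpre
  unfold Spec_crossout
  rw [Bool.eq_iff_iff]
  unfold crossout crossout_alt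
  by_cases hin : (0 ≤ row ∧ row < (grid.length : Int) ∧ 0 ≤ col ∧ col < (((grid.headD []).length : Int)))
  · obtain ⟨hr0, -, hc0, hc1⟩ := hin
    rw [if_pos ⟨hr0, h2, hc0, hc1⟩]
    simp only [List.any_cons, List.any_nil, Bool.or_false, Bool.or_eq_true, cellB_eq_cellA,
      List.any_eq_true, List.mem_range, Bool.and_eq_true, decide_eq_true_iff, beq_iff_eq]
    set m : Nat := (grid.headD []).length with hm
    set T := cellA grid row col with hT
    have hfr := walkR_iff grid row col T (by omega) h2 (grid.length + m + 2) col (by omega) (by push_cast; omega)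
    have hfl := walkL_iff grid row col T (by omega) h2 (grid.length + m + 2) col hc1 (by push_cast; omega)
    have hfd := walkD_iff grid row col T (by omega) hc1 (grid.length + m + 2) row (by omega) (by push_cast; omega)
    have hfu := walkU_iff grid row col T (by omega) hc1 (grid.length + m + 2) row h2 (by push_cast; omega)
    rw [hfr, hfl, hfd, hfu]
    constructor
    · rintro (⟨d, hd1, hd2, hd3, hd4⟩ | ⟨d, hd1, hd2, hd3, hd4⟩ | ⟨d, hd1, hd2, hd3, hd4⟩ | ⟨d, hd1, hd2, hd3, hd4⟩)
      · exact Or.inl ⟨d.toNat, by omega, by rw [Int.toNat_of_nonneg (by omega)]; exact ⟨hd3, hd4⟩⟩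
      · exact Or.inl ⟨d.toNat, by omega, by rw [Int.toNat_of_nonneg hd1]; exact ⟨hd3, hd4⟩⟩
      · exact Or.inr ⟨d.toNat, by omega, by rw [Int.toNat_of_nonneg (by omega)]; exact ⟨hd3, hd4⟩⟩
      · exact Or.inr ⟨d.toNat, by omega, by rw [Int.toNat_of_nonneg hd1]; exact ⟨hd3, hd4⟩⟩
    · rintro (⟨c, hd1, hd2, hd3⟩ | ⟨r, hd1, hd2, hd3⟩)
      · by_cases hle : col ≤ (c : Int)
        · exact Or.inl ⟨(c : Int), hle, by omega, hd2, hd3⟩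
        · exact Or.inr (Or.inl ⟨(c : Int), by omega, by omega, hd2, hd3⟩)
      · by_cases hle : row ≤ (r : Int)
        · exact Or.inr (Or.inr (Or.inl ⟨(r : Int), hle, by omega, hd2, hd3⟩))
        · exact Or.inr (Or.inr (Or.inr ⟨(r : Int), by omega, by omega, hd2, hd3⟩))
  · rw [if_neg hin]
    have hb : ¬((-1 : Int) < row ∧ row < (grid.length : Int) ∧ (-1 : Int) < col ∧ col < (((grid.headD []).length : Int))) := by
      intro hbb
      exact hin ⟨by omega, hbb.2.1, by omega, hbb.2.2.2⟩
    simp [walk_out grid row col _ _ _ hb]
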